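-- pv_equiv track=rewrite | github.com/Lastroboy/M1_MAS_RENNES2 | ProgPY/M1_S1_Python/TD2_Fonctions.py | indice_max_a
-- ===== SOURCE A (Python) =====
-- def indice_max_a(chn):
--     pos_max_A = None
--     nb_max_A = 0
--
--     for i, val in enumerate(chn):
--         if val.count("A") > nb_max_A:
--             nb_max_A = val.count("A")
--             pos_max_A = i
--
--     return pos_max_A
-- ===== SOURCE B (Python) =====
-- def indice_max_a(chn):
--     counts = [val.count("A") for val in chn]
--     if not counts:
--         return None
--     m = max(counts)
--     if m == 0:
--         return None
--     return counts.index(m)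
-- ===== Notes on version B (the rewrite author's own statement) =====
-- stated objective: simpler
-- what changed: Replaces the running-max scan over enumerate with a counts table followed by max() and first-occurrence index() lookups.
import Mathlib
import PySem

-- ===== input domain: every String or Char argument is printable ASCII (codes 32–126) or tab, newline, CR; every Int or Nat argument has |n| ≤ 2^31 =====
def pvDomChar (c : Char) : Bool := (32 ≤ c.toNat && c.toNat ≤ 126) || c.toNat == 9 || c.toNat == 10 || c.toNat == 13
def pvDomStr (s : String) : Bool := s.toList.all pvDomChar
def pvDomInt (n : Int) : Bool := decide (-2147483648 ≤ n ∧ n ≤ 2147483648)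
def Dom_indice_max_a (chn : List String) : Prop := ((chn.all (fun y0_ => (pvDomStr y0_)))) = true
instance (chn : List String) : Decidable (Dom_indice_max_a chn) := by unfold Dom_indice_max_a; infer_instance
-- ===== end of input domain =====

-- B replaces A's running-max scan with a counts table plus max()/index() lookups (objective: simpler).

-- ===== PORT A =====
def indice_max_a (chn : List String) : Option Int :=
  ((PySem.List.enumerate chn).foldl
    (fun (st : Option Int × Nat) (p : Int × String) =>
      if PySem.Str.count p.2 "A" > st.2 then (some p.1, PySem.Str.count p.2 "A") else st)
    (none, 0)).1

-- ===== PORT B =====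
def indice_max_a_alt (chn : List String) : Option Int :=
  let counts := chn.map (fun val => PySem.Str.count val "A")
  match PySem.List.max? counts (fun x => x) with
  | none => none
  | some m => if m = 0 then none else (PySem.List.index? counts m).map (fun k => (k : Int))

-- ===== PRECONDITION & SPEC =====
def Spec_indice_max_a (chn : List String) (out : Option Int) : Prop := out = indice_max_a_alt chn
instance (chn : List String) (out : Option Int) : Decidable (Spec_indice_max_a chn out) := by unfold Spec_indice_max_a; infer_instance

-- ===== CLAIM (what is proved, stated in full; the proofs are below) =====
def Claim_equal_indice_max_a : Prop := ∀ (chn : List String), Dom_indice_max_a chn → Spec_indice_max_a chn (indice_max_a chn)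

-- ===== LEMMAS AND PROOFS =====

-- A's loop, rephrased over the list of counts with an explicit running index
def pvRun (cs : List Nat) (s : Int) (st : Option Int × Nat) : Option Int × Nat :=
  match cs with
  | [] => st
  | c :: t => if c > st.2 then pvRun t (s + 1) (some s, c) else pvRun t (s + 1) st

def pvMaxN : List Nat → Nat
  | [] => 0
  | c :: t => max c (pvMaxN t)

lemma pvMaxN_mem (cs : List Nat) (h : cs ≠ []) : pvMaxN cs ∈ cs := by
  induction cs with
  | nil => simp at h
  | cons c t ih =>
    by_cases ht : t = []
    · subst ht; simp [pvMaxN]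
    · rcases Nat.le_total (pvMaxN t) c with hle | hle
      · simp [pvMaxN, Nat.max_eq_left hle]
      · simp [pvMaxN, Nat.max_eq_right hle, ih ht]

lemma pvFoldl_max (t : List Nat) (x : Nat) : t.foldl max x = max x (pvMaxN t) := by
  induction t generalizing x with
  | nil => simp [pvMaxN]
  | cons c t ih => simp [List.foldl_cons, ih, pvMaxN, Nat.max_assoc]

lemma pvIdxOf?_of_mem (l : List Nat) (v : Nat) (h : v ∈ l) :
    l.idxOf? v = some (l.idxOf v) := by
  induction l with
  | nil => simp at h
  | cons c t ih =>
    by_cases hc : c = v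
    · subst hc; simp [List.idxOf?_cons]
    · have hb : (c == v) = false := by simp [hc]
      have hvt : v ∈ t := by
        rcases List.mem_cons.mp h with h1 | h1
        · exact absurd h1.symm hc
        · exact h1
      simp only [List.idxOf?_cons, List.idxOf_cons, hb, cond_false, Bool.false_eq_true, if_false]
      rw [ih hvt]
      rfl

lemma pvRun_char (cs : List Nat) (s : Int) (pos : Option Int) (nb : Nat) :
    pvRun cs s (pos, nb) =
      if pvMaxN cs > nb then (some (s + (cs.idxOf (pvMaxN cs) : Int)), pvMaxN cs) else (pos, nb) := by
  induction cs generalizing s pos nb with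
  | nil => simp [pvRun, pvMaxN]
  | cons c t ih =>
    simp only [pvRun, pvMaxN]
    by_cases hc : c > nb
    · simp only [if_pos hc, ih]
      by_cases hm : pvMaxN t > c
      · have hmax : max c (pvMaxN t) = pvMaxN t := Nat.max_eq_right (Nat.le_of_lt hm)
        have hne : (c == pvMaxN t) = false := by simp; omega
        simp only [if_pos hm, hmax, if_pos (Nat.lt_trans hc hm), List.idxOf_cons, hne, cond_false]
        rw [Prod.mk.injEq]
        refine ⟨?_, rfl⟩
        rw [Option.some.injEq]
        push_cast
        ring
      · have hle : pvMaxN t ≤ c := Nat.le_of_not_lt hm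
        have hmax : max c (pvMaxN t) = c := Nat.max_eq_left hle
        simp only [if_neg hm, hmax, if_pos hc, List.idxOf_cons, beq_self_eq_true, cond_true]
        simp
    · have hcle : c ≤ nb := Nat.le_of_not_lt hc
      simp only [if_neg hc, ih]
      by_cases hm : pvMaxN t > nb
      · have hmax : max c (pvMaxN t) = pvMaxN t := Nat.max_eq_right (by omega)
        have hne : (c == pvMaxN t) = false := by simp; omega
        simp only [if_pos hm, hmax, List.idxOf_cons, hne, cond_false]
        rw [Prod.mk.injEq]
        refine ⟨?_, rfl⟩
        rw [Option.some.injEq]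
        push_cast
        ring
      · have hnm : ¬ max c (pvMaxN t) > nb := by omega
        simp [if_neg hm, hnm]

lemma pvFoldA_eq_run (chn : List String) (s : Int) (st : Option Int × Nat) :
    (PySem.List.enumerate chn s).foldl
      (fun (st : Option Int × Nat) (p : Int × String) =>
        if PySem.Str.count p.2 "A" > st.2 then (some p.1, PySem.Str.count p.2 "A") else st) st
    = pvRun (chn.map (fun val => PySem.Str.count val "A")) s st := by
  induction chn generalizing s st with
  | nil => simp [PySem.List.enumerate_nil, pvRun]
  | cons x t ih =>
    rw [PySem.List.enumerate_cons, List.map_cons, List.foldl_cons, ih]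
    show pvRun _ (s + 1) (if PySem.Str.count x "A" > st.2 then (some s, PySem.Str.count x "A") else st) = _
    simp only [pvRun]
    split <;> rfl

lemma pvAlt_cons (x : String) (t : List String) :
    indice_max_a_alt (x :: t) =
      (let counts := (x :: t).map (fun val => PySem.Str.count val "A")
       if pvMaxN counts = 0 then none
       else (PySem.List.index? counts (pvMaxN counts)).map (fun k => (k : Int))) := by
  simp only [indice_max_a_alt, List.map_cons]
  rw [PySem.List.max?_id_cons, pvFoldl_max]
  rfl

-- ===== VERDICT (by name: the statement is the Claim_ definition above) =====
theorem indice_max_a_spec : Claim_equal_indice_max_a := by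
  intro chn _
  unfold Spec_indice_max_a indice_max_a
  rw [pvFoldA_eq_run, pvRun_char]
  cases chn with
  | nil => rfl
  | cons x t =>
    rw [pvAlt_cons]
    simp only [List.map_cons]
    by_cases hz : pvMaxN (PySem.Str.count x "A" :: t.map (fun val => PySem.Str.count val "A")) = 0
    · rw [hz]
      simp
    · have hpos : 0 < pvMaxN (PySem.Str.count x "A" :: t.map (fun val => PySem.Str.count val "A")) :=
        Nat.pos_of_ne_zero hz
      have hmem := pvMaxN_mem (PySem.Str.count x "A" :: t.map (fun val => PySem.Str.count val "A")) (by simp)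
      rw [if_pos hpos, if_neg hz, PySem.List.index?_eq_idxOf?, pvIdxOf?_of_mem _ _ hmem]
      simp
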